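-- pv_equiv track=rewrite | github.com/jeremiemayer/social-media-extractor | app/results_generator.py | dict_attributes
-- ===== SOURCE A (Python) =====
-- MSSQL_COLUMN_MAX = 4000 #4000 characters is max sql field length
--
-- def dict_attributes(dict_list):
--     "return dictionaries attributes required to generate table schema"
--     fields_dict = {}
--     fields = list(set().union(*(dict.keys() for dict in dict_list))) #create a unique set of all dict keys
--     fields.sort()
--     for field in fields:
--         max_val = []
--         #find the length of every value for a given key
--         for dict in dict_list:
--             if field in dict:
--                 max_val.append(len(dict[field]))
--         #set column size based on the largest value for a given key
--         column_size = max(max_val)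
--         if column_size > MSSQL_COLUMN_MAX :
--             fields_dict[field] = 0 #force default to MAX when assigned as a column
--         elif column_size > 0:
--             fields_dict[field] = column_size
--         else:
--             fields_dict[field] = 1 # give field length a minimum of 1 to prevent default to MAX
--     return fields_dict
-- ===== SOURCE B (Python) =====
-- MSSQL_COLUMN_MAX = 4000 #4000 characters is max sql field length
--
-- def dict_attributes(dict_list):
--     "return dictionaries attributes required to generate table schema"
--     # single pass over all dicts: running maximum value-length per key
--     maxima = {}
--     for d in dict_list:
--         for key, value in d.items():
--             maxima[key] = max(maxima.get(key, 0), len(value))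
--     fields_dict = {}
--     for key in sorted(maxima):
--         m = maxima[key]
--         if m > MSSQL_COLUMN_MAX:
--             fields_dict[key] = 0
--         elif m > 0:
--             fields_dict[key] = m
--         else:
--             fields_dict[key] = 1
--     return fields_dict
-- ===== Notes on version B (the rewrite author's own statement) =====
-- stated objective: faster
-- what changed: Instead of collecting all keys and then rescanning every dict per key to list all value lengths, B makes one pass over all key/value pairs keeping a running max length per key in a dict, then emits the sorted keys with the same clamping.
import Mathlib
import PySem

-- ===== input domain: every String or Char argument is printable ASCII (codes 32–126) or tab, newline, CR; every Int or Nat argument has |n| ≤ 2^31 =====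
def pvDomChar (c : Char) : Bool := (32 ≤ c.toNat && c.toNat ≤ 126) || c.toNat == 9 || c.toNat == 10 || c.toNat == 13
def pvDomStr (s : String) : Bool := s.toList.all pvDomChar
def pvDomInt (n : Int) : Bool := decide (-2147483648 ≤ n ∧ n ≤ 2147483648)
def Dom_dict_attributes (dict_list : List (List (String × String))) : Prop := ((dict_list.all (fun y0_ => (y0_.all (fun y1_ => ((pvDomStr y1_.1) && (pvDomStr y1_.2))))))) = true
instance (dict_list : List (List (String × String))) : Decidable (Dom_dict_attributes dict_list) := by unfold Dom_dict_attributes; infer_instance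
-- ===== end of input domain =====

-- B replaces A's per-field rescan of all dicts by one pass accumulating a running max length per key.

-- ===== PORT A =====
-- inner Python dicts are represented as association lists; PySem.Dict.ofList applies Python's
-- duplicate-key collapse (last value wins) before A's dict operations are used
def dict_attributes (dict_list : List (List (String × String))) : List (String × Int) :=
  let ds := dict_list.map (fun dl => PySem.Dict.ofList dl)
  -- fields = list(set().union(*(dict.keys() for dict in dict_list))); fields.sort()
  let fields := PySem.List.sorted
    (ds.foldl (fun s d => PySem.Set.update s d.keys) PySem.Set.empty) (fun k => k) false
  let fields_dict :=
    fields.foldl (fun fd field =>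
      -- max_val = [len(dict[field]) for dict in dict_list if field in dict]
      let max_val : List Int :=
        ds.foldl (fun acc d =>
          if d.contains field then acc ++ [PySem.Str.len (d.getD field "")] else acc) []
      -- column_size = max(max_val); max_val is never empty here (field comes from some dict's
      -- keys), so the .getD 0 default for Python's ValueError is unreachable
      let column_size := (PySem.List.max? max_val (fun x => x)).getD 0
      if column_size > 4000 then fd.insert field 0
      else if column_size > 0 then fd.insert field column_size
      else fd.insert field 1) PySem.Dict.empty
  fields_dict.items

-- ===== PORT B =====
def dict_attributes_alt (dict_list : List (List (String × String))) : List (String × Int) :=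
  let maxima : PySem.Dict String Int :=
    dict_list.foldl (fun m dl =>
      (PySem.Dict.ofList dl).items.foldl
        (fun m kv => m.modify kv.1 0 (fun c => max c (PySem.Str.len kv.2))) m)
      PySem.Dict.empty
  let fields_dict :=
    (PySem.List.sorted maxima.keys (fun k => k) false).foldl (fun fd key =>
      let m := maxima.getD key 0
      if m > 4000 then fd.insert key 0
      else if m > 0 then fd.insert key m
      else fd.insert key 1) PySem.Dict.empty
  fields_dict.items

-- ===== PRECONDITION & SPEC =====
def Spec_dict_attributes (dict_list : List (List (String × String))) (out : List (String × Int)) : Prop := out = dict_attributes_alt dict_list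
instance (dict_list : List (List (String × String))) (out : List (String × Int)) : Decidable (Spec_dict_attributes dict_list out) := by unfold Spec_dict_attributes; infer_instance

-- ===== CLAIM (what is proved, stated in full; the proofs are below) =====
def Claim_equal_dict_attributes : Prop := ∀ (dict_list : List (List (String × String))), Dom_dict_attributes dict_list → Spec_dict_attributes dict_list (dict_attributes dict_list)

-- ===== LEMMAS AND PROOFS =====

-- all the items of all the (collapsed) dicts, in order
def pvItemsAll (dict_list : List (List (String × String))) : List (String × String) :=
  (dict_list.map (fun dl => (PySem.Dict.ofList dl).items)).flatten

-- B's accumulation dict characterised per key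
lemma pv_getD_foldl_modify_max (l : List (String × String)) (m : PySem.Dict String Int) (k : String) :
    (l.foldl (fun m kv => m.modify kv.1 0 (fun c => max c (PySem.Str.len kv.2))) m).getD k 0
      = (l.filter (fun p => p.1 == k)).foldl (fun a p => max a (PySem.Str.len p.2)) (m.getD k 0) := by
  induction l generalizing m with
  | nil => rfl
  | cons p t ih =>
    simp only [List.foldl_cons, List.filter_cons]
    by_cases h : p.1 = k
    · subst h
      rw [ih, PySem.Dict.getD_modify]
      simp
    · have hb : (p.1 == k) = false := by simpa using h
      rw [ih, PySem.Dict.getD_modify]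
      simp [hb, Ne.symm h]

-- a nodup-keyed dict's items filtered at one key
lemma pv_filter_keys_nodup (ks : List String) (f : String) (h : ks.Nodup) :
    ks.filter (fun x => x == f) = if f ∈ ks then [f] else [] := by
  induction ks with
  | nil => simp
  | cons a t ih =>
    rw [List.nodup_cons] at h
    obtain ⟨ha, ht⟩ := h
    simp only [List.filter_cons]
    by_cases haf : a = f
    · subst haf
      have hnil : t.filter (fun x => x == a) = [] :=
        List.filter_eq_nil_iff.2 (fun x hx => by simp; intro e; exact ha (e ▸ hx))
      simp [hnil]
    · have hb : (a == f) = false := by simpa using haf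
      rw [ih ht]
      simp [List.mem_cons, Ne.symm haf, haf]

lemma pv_dict_filter_key (d : PySem.Dict String String) (hnd : d.keys.Nodup) (f : String) :
    d.items.filter (fun p => p.1 == f)
      = if d.contains f then [(f, d.getD f "")] else [] := by
  have hitems := PySem.Dict.items_eq_map_keys d hnd ""
  rw [hitems, List.filter_map]
  have : ((fun (p : String × String) => p.1 == f) ∘ (fun k => (k, d.getD k ""))) = (fun x => x == f) := rfl
  rw [this, pv_filter_keys_nodup d.keys f hnd]
  by_cases hf : f ∈ d.keys
  · have hc : d.contains f = true := by
      rw [PySem.Dict.contains_eq_decide_mem_keys]; simpa using hf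
    simp [hf, hc]
  · have hc : d.contains f = false := by
      rw [PySem.Dict.contains_eq_decide_mem_keys]; simpa using hf
    simp [hf, hc]

-- Python's max(vs) agrees with a fold of `max` from 0 on nonnegative lists (and both give 0 on [])
lemma pv_max?_foldl (t : List Int) (a : Int) :
    PySem.List.max? (a :: t) (fun x => x) = some (t.foldl max a) := by
  induction t generalizing a with
  | nil => rfl
  | cons v t ih =>
    have h1 : PySem.List.max? (a :: v :: t) (fun x : Int => x)
        = PySem.List.max? (max a v :: t) (fun x => x) := by
      simp only [PySem.List.max?, List.foldl_cons]
      by_cases h : a < v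
      · simp [h, max_eq_right (le_of_lt h)]
      · simp [h, max_eq_left (le_of_not_gt h)]
    rw [h1, ih, List.foldl_cons]

lemma pv_max_eq (vs : List Int) (hnn : ∀ x ∈ vs, 0 ≤ x) :
    (PySem.List.max? vs (fun x => x)).getD 0 = vs.foldl max 0 := by
  cases vs with
  | nil => rfl
  | cons v t =>
    have h0 : (0 : Int) ≤ v := hnn v (by simp)
    rw [pv_max?_foldl]
    simp [List.foldl_cons, max_eq_right h0]

-- the one value both programs assign to a field
lemma pv_value_eq (dict_list : List (List (String × String))) (f : String) :
    ((dict_list.map (fun dl => PySem.Dict.ofList dl)).foldl (fun acc d =>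
        if d.contains f then acc ++ [PySem.Str.len (d.getD f "")] else acc) ([] : List Int))
      = ((pvItemsAll dict_list).filter (fun p => p.1 == f)).map (fun p => PySem.Str.len p.2) := by
  rw [PySem.List.foldl_append_if, List.nil_append, List.filter_map]
  simp only [Function.comp_def]
  induction dict_list with
  | nil => rfl
  | cons dl t ih =>
    simp only [pvItemsAll, List.map_cons, List.flatten_cons, List.filter_append,
      List.map_append, List.filter_cons] at ih ⊢
    rw [pv_dict_filter_key _ (PySem.Dict.nodup_keys_ofList dl) f]
    simp only [List.filter_flatten, List.map_flatten, List.map_map, Function.comp_def, PySem.Str.len_eq, String.length_toList] at ih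
    by_cases h : (PySem.Dict.ofList dl).contains f
    · simp [h, List.map_map, Function.comp_def, ih]
    · simp [h, List.map_map, Function.comp_def, ih]

-- per-key values of the two programs, and the shared clamping
def pvClamp (v : Int) : Int := if v > 4000 then 0 else if v > 0 then v else 1

def pvValA (dict_list : List (List (String × String))) (k : String) : Int :=
  (PySem.List.max? ((dict_list.map (fun dl => PySem.Dict.ofList dl)).foldl
    (fun acc d => if d.contains k then acc ++ [PySem.Str.len (d.getD k "")] else acc)
    ([] : List Int)) (fun x => x)).getD 0

def pvValB (dict_list : List (List (String × String))) (k : String) : Int :=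
  ((pvItemsAll dict_list).foldl
    (fun m kv => m.modify kv.1 0 (fun c => max c (PySem.Str.len kv.2)))
    PySem.Dict.empty).getD k 0

lemma pv_val_eq (dict_list : List (List (String × String))) (k : String) :
    pvValA dict_list k = pvValB dict_list k := by
  have hnn : ∀ x ∈ ((pvItemsAll dict_list).filter (fun p => p.1 == k)).map
      (fun p => PySem.Str.len p.2), 0 ≤ x := by
    intro x hx
    obtain ⟨p, _, rfl⟩ := List.mem_map.mp hx
    simp [PySem.Str.len_eq]
  simp only [pvValA, pvValB]
  rw [pv_value_eq dict_list k, pv_max_eq _ hnn, pv_getD_foldl_modify_max, List.foldl_map]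
  simp [PySem.Dict.getD_empty]

-- a fold of clamped inserts over a nodup key list, as an items list
lemma pv_items_clamp_fold (F : List String) (v : String → Int) (hnd : F.Nodup) :
    (F.foldl (fun fd k =>
        if v k > 4000 then fd.insert k 0
        else if v k > 0 then fd.insert k (v k) else fd.insert k 1)
      (PySem.Dict.empty : PySem.Dict String Int)).items
    = F.map (fun k => (k, pvClamp (v k))) := by
  have hfun : (fun (fd : PySem.Dict String Int) k =>
      if v k > 4000 then fd.insert k 0
      else if v k > 0 then fd.insert k (v k) else fd.insert k 1)
      = fun fd k => fd.insert k (pvClamp (v k)) := by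
    funext fd k
    simp only [pvClamp]
    split_ifs <;> rfl
  rw [hfun]
  have h := PySem.Dict.items_foldl_insert_fresh F (fun k => k) (fun k => pvClamp (v k))
    PySem.Dict.empty (fun a _ => PySem.Dict.contains_empty a) (by simpa using hnd)
  simpa using h

-- ===== VERDICT (by name: the statement is the Claim_ definition above) =====
theorem dict_attributes_spec : Claim_equal_dict_attributes := by
  intro dict_list _
  show dict_attributes dict_list = dict_attributes_alt dict_list
  have hflatkeys : (pvItemsAll dict_list).map Prod.fst
      = (dict_list.map (fun dl => (PySem.Dict.ofList dl).keys)).flatten := by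
    simp only [pvItemsAll, List.map_flatten, List.map_map]
    rfl
  have hFA : (dict_list.map (fun dl => PySem.Dict.ofList dl)).foldl
      (fun s d => PySem.Set.update s d.keys) PySem.Set.empty
      = PySem.Set.ofList ((pvItemsAll dict_list).map Prod.fst) := by
    rw [PySem.Set.ofList_eq_foldl, hflatkeys, List.foldl_flatten, List.foldl_map, List.foldl_map]
    rfl
  have hflat : dict_list.foldl (fun m dl =>
        (PySem.Dict.ofList dl).items.foldl
          (fun m kv => m.modify kv.1 0 (fun c => max c (PySem.Str.len kv.2))) m)
        PySem.Dict.empty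
      = (pvItemsAll dict_list).foldl
          (fun m kv => m.modify kv.1 0 (fun c => max c (PySem.Str.len kv.2)))
          PySem.Dict.empty := by
    simp only [pvItemsAll]
    rw [List.foldl_flatten, List.foldl_map]
  have hupd : PySem.Set.update (PySem.Dict.empty : PySem.Dict String Int).keys
      ((pvItemsAll dict_list).map Prod.fst)
      = PySem.Set.ofList ((pvItemsAll dict_list).map Prod.fst) := by
    rw [PySem.Set.ofList_eq_foldl]; rfl
  have hkeysB : ((pvItemsAll dict_list).foldl
        (fun m kv => m.modify kv.1 0 (fun c => max c (PySem.Str.len kv.2)))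
        (PySem.Dict.empty : PySem.Dict String Int)).keys
      = PySem.Set.ofList ((pvItemsAll dict_list).map Prod.fst) :=
    (PySem.Dict.keys_foldl_modify_key (pvItemsAll dict_list) Prod.fst 0
      (fun _ kv c => max c (PySem.Str.len kv.2)) PySem.Dict.empty).trans hupd
  have hndF : (PySem.List.sorted (PySem.Set.ofList ((pvItemsAll dict_list).map Prod.fst))
      (fun k => k) false).Nodup :=
    (PySem.List.sorted_perm _ _ _).nodup_iff.mpr (PySem.Set.nodup_ofList _)
  have h1 : dict_attributes dict_list
      = (PySem.List.sorted (PySem.Set.ofList ((pvItemsAll dict_list).map Prod.fst))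
          (fun k => k) false).map (fun k => (k, pvClamp (pvValA dict_list k))) := by
    simp only [dict_attributes]
    rw [hFA]
    exact pv_items_clamp_fold _ (pvValA dict_list) hndF
  have h2 : dict_attributes_alt dict_list
      = (PySem.List.sorted (PySem.Set.ofList ((pvItemsAll dict_list).map Prod.fst))
          (fun k => k) false).map (fun k => (k, pvClamp (pvValB dict_list k))) := by
    simp only [dict_attributes_alt]
    rw [hflat, hkeysB]
    exact pv_items_clamp_fold _ (pvValB dict_list) hndF
  rw [h1, h2]
  exact List.map_congr_left (fun k _ => by rw [pv_val_eq])
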